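-- pv_equiv track=rewrite | github.com/zeunala/ProblemSolving | BOJ/2023.04-2023.06/S2_10434.py | checkHappyPrime
-- ===== SOURCE A (Python) =====
-- import math
--
-- def getSquareSum(num): # 자리수의 제곱의 합을 리턴
--     result = 0
--     while num > 0:
--         result += (num % 10) ** 2
--         num //= 10
--     return result
--
-- def isPrime(num): # 소수인지 여부 리턴
--     if num == 1:
--         return False
--
--     for i in range(2, math.floor(math.sqrt(num)) + 1):
--         if num % i == 0:
--             return False
--     return True
--
-- def checkHappyPrime(num): # 행복한 소수이면 "YES"를, 아니면 "NO" 문자열 반환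
--     if not isPrime(num):
--         return "NO"
--
--     isVisited = set()
--     while num != 1 and num not in isVisited:
--         isVisited.add(num)
--         num = getSquareSum(num)
--
--     if num == 1:
--         return "YES"
--     else:
--         return "NO"
-- ===== SOURCE B (Python) =====
-- def getSquareSum(num):  # sum of squares of decimal digits
--     result = 0
--     while num > 0:
--         result += (num % 10) ** 2
--         num //= 10
--     return result
--
-- def isPrime(num):  # trial division: no float sqrt, handles num < 2 directly
--     if num < 2:
--         return False
--     i = 2
--     while i * i <= num:
--         if num % i == 0:
--             return False
--         i += 1
--     return True
--
-- def checkHappyPrime(num):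
--     if not isPrime(num):
--         return "NO"
--     # every positive digit-square-sum trajectory ends at 1 or enters the cycle
--     # containing 4, so testing against the two sentinels needs no visited set
--     while num != 1 and num != 4:
--         num = getSquareSum(num)
--     return "YES" if num == 1 else "NO"
-- ===== Notes on version B (the rewrite author's own statement) =====
-- stated objective: simpler
-- what changed: The happy-number loop now iterates until the value hits the sentinel 1 or 4 (every positive digit-square-sum trajectory ends at 1 or in the cycle through 4), removing the growing visited set, and primality uses plain trial division (while i*i <= num) instead of a float-sqrt-bounded range scan.
import Mathlib
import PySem

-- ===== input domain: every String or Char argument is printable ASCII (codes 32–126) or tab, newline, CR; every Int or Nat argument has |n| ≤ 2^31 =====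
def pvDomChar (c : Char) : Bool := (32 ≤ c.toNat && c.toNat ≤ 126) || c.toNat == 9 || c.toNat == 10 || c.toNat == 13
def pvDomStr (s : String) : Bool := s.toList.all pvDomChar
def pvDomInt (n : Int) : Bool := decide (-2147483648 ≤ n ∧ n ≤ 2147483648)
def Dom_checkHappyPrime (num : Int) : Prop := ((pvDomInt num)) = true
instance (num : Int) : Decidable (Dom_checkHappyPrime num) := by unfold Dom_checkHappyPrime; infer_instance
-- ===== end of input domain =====

-- B replaces A's visited-set happy loop by the classic 1-or-4 sentinel loop (no
-- visited set) and A's float-sqrt-bounded primality range by plain trial division;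
-- same return value on the claimed inputs.

-- ===== PORT A =====

-- shared helper: getSquareSum is textually identical in Source A and Source B.
-- The Nat argument is a fuel guard for totality only: 64 is never exhausted, a
-- number below 2^64 has at most 20 decimal digits.
def gssAux (result num : Int) : Nat → Int
  | 0 => result
  | f + 1 =>
    if 0 < num then gssAux (result + (PySem.Int.mod num 10) ^ 2) (PySem.Int.floordiv num 10) f
    else result

def getSquareSum (num : Int) : Int := gssAux 0 num 64

-- integer square root by counting up (fuel 65536 covers every n ≤ 2^32);
-- used to port math.floor(math.sqrt(num)), which equals the integer square root
-- exactly on 0 ≤ num ≤ 2^31 (double sqrt is correctly rounded there);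
-- math.sqrt raises ValueError for num < 0, excluded by Pre_.
def isqrtAux (n r : Nat) : Nat → Nat
  | 0 => r
  | f + 1 => if (r + 1) * (r + 1) ≤ n then isqrtAux n (r + 1) f else r

def isqrt (n : Nat) : Nat := isqrtAux n 0 65536

def isPrimeLoopA (num : Int) : List Int → Bool
  | [] => true
  | i :: rest => if PySem.Int.mod num i = 0 then false else isPrimeLoopA num rest

def isPrimeA (num : Int) : Bool :=
  if num = 1 then false
  else isPrimeLoopA num (PySem.List.pyRange 2 (((isqrt num.toNat : Int)) + 1) 1)

-- A's while loop; fuel guard 1000 (never exhausted on the claimed inputs,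
-- as the proofs below establish)
def happyLoopA (visited : PySem.Set Int) (num : Int) : Nat → String
  | 0 => "NO"
  | f + 1 =>
    if num ≠ 1 ∧ num ∉ visited then
      happyLoopA (PySem.Set.add visited num) (getSquareSum num) f
    else if num = 1 then "YES" else "NO"

def checkHappyPrime (num : Int) : String :=
  if !(isPrimeA num) then "NO"
  else happyLoopA PySem.Set.empty num 1000

-- ===== PORT B =====

-- B's trial-division loop; fuel guard 65536 (i exceeds √num ≤ √2^31 < 65536 first)
def isPrimeLoopB (num i : Int) : Nat → Bool
  | 0 => true
  | f + 1 =>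
    if i * i ≤ num then
      if PySem.Int.mod num i = 0 then false else isPrimeLoopB num (i + 1) f
    else true

def isPrimeB (num : Int) : Bool :=
  if num < 2 then false else isPrimeLoopB num 2 65536

-- B's sentinel while loop; fuel guard as in port A
def happyLoopB (num : Int) : Nat → String
  | 0 => "NO"
  | f + 1 =>
    if num ≠ 1 ∧ num ≠ 4 then happyLoopB (getSquareSum num) f
    else if num = 1 then "YES" else "NO"

def checkHappyPrime_alt (num : Int) : String :=
  if !(isPrimeB num) then "NO"
  else happyLoopB num 1000

-- ===== PRECONDITION & SPEC =====
-- Pre_ excludes num < 0, on which A raises ValueError (math.sqrt of a negative number).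
def Pre_checkHappyPrime (num : Int) : Prop := 0 ≤ num
instance (num : Int) : Decidable (Pre_checkHappyPrime num) := by unfold Pre_checkHappyPrime; infer_instance
def pvWitness_checkHappyPrime : Int := (7)

def Spec_checkHappyPrime (num : Int) (out : String) : Prop := out = checkHappyPrime_alt num
instance (num : Int) (out : String) : Decidable (Spec_checkHappyPrime num out) := by unfold Spec_checkHappyPrime; infer_instance

-- ===== CLAIM (what is proved, stated in full; the proofs are below) =====
def Claim_equal_checkHappyPrime : Prop := ∀ (num : Int), Dom_checkHappyPrime num → Pre_checkHappyPrime num → Spec_checkHappyPrime num (checkHappyPrime num)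

-- ===== LEMMAS AND PROOFS =====

lemma isqrtAux_eq_sqrt (n : Nat) : ∀ (f r : Nat), r * r ≤ n → Nat.sqrt n ≤ r + f →
    isqrtAux n r f = Nat.sqrt n := by
  intro f
  induction f with
  | zero =>
    intro r hr hf
    have := Nat.le_sqrt.mpr hr
    simp only [isqrtAux]
    omega
  | succ f ih =>
    intro r hr hf
    rw [isqrtAux]
    by_cases h : (r + 1) * (r + 1) ≤ n
    · rw [if_pos h]
      exact ih (r + 1) h (by omega)
    · rw [if_neg h]
      have h1 : ¬ (r + 1 ≤ Nat.sqrt n) := fun hc => h (Nat.le_sqrt.mp hc)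
      have h2 := Nat.le_sqrt.mpr hr
      omega

lemma isqrt_eq_sqrt (n : Nat) (h : n ≤ 4294967296) : isqrt n = Nat.sqrt n := by
  apply isqrtAux_eq_sqrt n 65536 0 (by omega)
  have h1 : ¬ (65537 ≤ Nat.sqrt n) := fun hc => by
    have := Nat.le_sqrt.mp hc; omega
  omega

lemma gssAux_nonneg : ∀ (f : Nat) (result num : Int), 0 ≤ result → 0 ≤ gssAux result num f := by
  intro f
  induction f with
  | zero => intro r n hr; exact hr
  | succ f ih =>
    intro r n hr
    rw [gssAux]
    by_cases h : 0 < n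
    · rw [if_pos h]
      exact ih _ _ (add_nonneg hr (sq_nonneg _))
    · rw [if_neg h]; exact hr

lemma gssAux_le (k : Nat) : ∀ (f : Nat) (result num : Int), 0 ≤ num → num < 10 ^ k →
    gssAux result num f ≤ result + 81 * k := by
  induction k with
  | zero =>
    intro f r n h0 h1
    have hn : n = 0 := by simp at h1; omega
    subst hn
    cases f with
    | zero => simp [gssAux]
    | succ f => simp [gssAux]
  | succ k ih =>
    intro f r n h0 h1
    cases f with
    | zero =>
      rw [gssAux]
      have : (0:Int) ≤ 81 * ((k:Int) + 1) := by positivity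
      push_cast
      omega
    | succ f =>
      rw [gssAux]
      by_cases h : 0 < n
      · rw [if_pos h]
        have h10 : (0:Int) < 10 := by norm_num
        rw [PySem.Int.floordiv_eq_ediv_of_pos h10, PySem.Int.mod_eq_emod_of_pos h10]
        have hm0 : 0 ≤ n % 10 := Int.emod_nonneg n (by norm_num)
        have hm1 : n % 10 < 10 := Int.emod_lt_of_pos n (by norm_num)
        have hd0 : 0 ≤ n / 10 := Int.ediv_nonneg h0 (by norm_num)
        have hd1 : n / 10 < 10 ^ k := by
          rw [Int.ediv_lt_iff_lt_mul (by norm_num)]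
          calc n < 10 ^ (k + 1) := h1
          _ = 10 ^ k * 10 := by ring
        have hrec := ih f (r + (n % 10) ^ 2) (n / 10) hd0 hd1
        have hsq : (n % 10) ^ 2 ≤ 81 := by nlinarith
        push_cast at hrec ⊢
        nlinarith
      · rw [if_neg h]
        have : (0:Int) ≤ 81 * ((k:Int) + 1) := by positivity
        push_cast
        omega

lemma gss_nonneg (num : Int) : 0 ≤ getSquareSum num :=
  gssAux_nonneg 64 0 num le_rfl

lemma gss_le_810 (num : Int) (h0 : 0 ≤ num) (h1 : num ≤ 2147483648) :
    getSquareSum num ≤ 810 := by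
  have := gssAux_le 10 64 0 num h0 (by norm_num; omega)
  simpa using this

-- A's happy loop inspects the visited set only through membership of values ≤ 810
lemma happyLoopA_congr : ∀ (f : Nat) (v : Int) (S T : PySem.Set Int),
    (∀ x : Int, 0 ≤ x → x ≤ 810 → (x ∈ S ↔ x ∈ T)) →
    0 ≤ v → v ≤ 810 → happyLoopA S v f = happyLoopA T v f := by
  intro f
  induction f with
  | zero => intro v S T _ _ _; rfl
  | succ f ih =>
    intro v S T hST hv0 hv1
    rw [happyLoopA, happyLoopA]
    have hmem : v ∈ S ↔ v ∈ T := hST v hv0 hv1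
    by_cases hc : v ≠ 1 ∧ v ∉ S
    · rw [if_pos hc, if_pos ⟨hc.1, fun h => hc.2 (hmem.mpr h)⟩]
      exact ih (getSquareSum v) _ _
        (fun x hx0 hx1 => by
          rw [PySem.Set.mem_add, PySem.Set.mem_add, hST x hx0 hx1])
        (gss_nonneg v) (gss_le_810 v hv0 (by omega))
    · rw [if_neg hc, if_neg (fun hc' : v ≠ 1 ∧ v ∉ T =>
        hc ⟨hc'.1, fun h => hc'.2 (hmem.mp h)⟩)]

set_option maxHeartbeats 4000000 in
set_option maxRecDepth 100000 in
lemma happy_small : ∀ v : Nat, v < 811 →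
    happyLoopA PySem.Set.empty (v : Int) 999 = happyLoopB (v : Int) 999 := by decide

set_option maxHeartbeats 4000000 in
set_option maxRecDepth 100000 in
lemma small_eq : ∀ v : Nat, v < 811 →
    checkHappyPrime (v : Int) = checkHappyPrime_alt (v : Int) := by decide

lemma isPrimeLoopA_iff (num : Int) : ∀ (l : List Int),
    (isPrimeLoopA num l = true ↔ ∀ i ∈ l, PySem.Int.mod num i ≠ 0) := by
  intro l
  induction l with
  | nil => simp [isPrimeLoopA]
  | cons i rest ih =>
    rw [isPrimeLoopA]
    by_cases h : PySem.Int.mod num i = 0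
    · rw [if_pos h]
      constructor
      · intro hf; cases hf
      · intro hall; exact absurd h (hall i List.mem_cons_self)
    · rw [if_neg h, ih]
      constructor
      · intro hall j hj
        rcases List.mem_cons.mp hj with rfl | hj'
        · exact h
        · exact hall j hj'
      · intro hall j hj
        exact hall j (List.mem_cons_of_mem i hj)

-- j*j ≤ num is exactly j ≤ ⌊√num⌋ (both sides nonnegative)
lemma sqrt_bridge (num j : Int) (h0 : 0 ≤ num) (hj : 0 ≤ j) :
    j * j ≤ num ↔ j ≤ ((Nat.sqrt num.toNat : Int)) := by
  have hnum : ((num.toNat : Int)) = num := Int.toNat_of_nonneg h0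
  have hjn : ((j.toNat : Int)) = j := Int.toNat_of_nonneg hj
  have hcast : ((j.toNat * j.toNat : Nat) : Int) = j * j := by push_cast [hjn]; ring
  constructor
  · intro h
    have h1 : j.toNat * j.toNat ≤ num.toNat := by
      have : ((j.toNat * j.toNat : Nat) : Int) ≤ ((num.toNat : Nat) : Int) := by
        rw [hcast, hnum]; exact h
      exact_mod_cast this
    have := Nat.le_sqrt.mpr h1
    omega
  · intro h
    have h1 : j.toNat ≤ Nat.sqrt num.toNat := by omega
    have h2 := Nat.le_sqrt.mp h1
    have : ((j.toNat * j.toNat : Nat) : Int) ≤ ((num.toNat : Nat) : Int) := by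
      exact_mod_cast h2
    rw [hcast, hnum] at this
    exact this

lemma isPrimeLoopB_iff (num : Int) (hnum : 0 ≤ num) : ∀ (f : Nat) (i : Int), 2 ≤ i →
    ((Nat.sqrt num.toNat : Int)) + 2 ≤ i + f →
    (isPrimeLoopB num i f = true ↔
      ∀ j : Int, i ≤ j → j * j ≤ num → PySem.Int.mod num j ≠ 0) := by
  intro f
  induction f with
  | zero =>
    intro i h2 hf
    rw [isPrimeLoopB]
    constructor
    · intro _ j hj hjj
      have := (sqrt_bridge num j hnum (by omega)).mp hjj
      omega
    · intro _; rfl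
  | succ f ih =>
    intro i h2 hf
    rw [isPrimeLoopB]
    by_cases hle : i * i ≤ num
    · rw [if_pos hle]
      by_cases hmod : PySem.Int.mod num i = 0
      · rw [if_pos hmod]
        constructor
        · intro hf; cases hf
        · intro h; exact absurd hmod (h i le_rfl hle)
      · rw [if_neg hmod, ih (i + 1) (by omega) (by push_cast at hf ⊢; omega)]
        constructor
        · intro h j hj hjj
          rcases eq_or_lt_of_le hj with rfl | hj'
          · exact hmod
          · exact h j (by omega) hjj
        · intro h j hj hjj
          exact h j (by omega) hjj
    · rw [if_neg hle]
      constructor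
      swap
      · intro _; rfl
      intro _ j hj hjj
      have hjs := (sqrt_bridge num j hnum (by omega)).mp hjj
      have his : ¬ (i ≤ ((Nat.sqrt num.toNat : Int))) :=
        fun hc => hle ((sqrt_bridge num i hnum (by omega)).mpr hc)
      omega

lemma isPrime_eq (num : Int) (h2 : 2 ≤ num) (hub : num ≤ 2147483648) :
    isPrimeA num = isPrimeB num := by
  have hnn : 0 ≤ num := by omega
  have hA : isPrimeA num
      = isPrimeLoopA num (PySem.List.pyRange 2 (((isqrt num.toNat : Int)) + 1) 1) := by
    rw [isPrimeA, if_neg (by omega)]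
  have hB : isPrimeB num = isPrimeLoopB num 2 65536 := by
    rw [isPrimeB, if_neg (by omega)]
  have hq : isqrt num.toNat = Nat.sqrt num.toNat := isqrt_eq_sqrt num.toNat (by omega)
  have hsub : Nat.sqrt num.toNat ≤ 65536 := by
    have h1 : ¬ (65537 ≤ Nat.sqrt num.toNat) := fun hc => by
      have := Nat.le_sqrt.mp hc; omega
    omega
  rw [hA, hB, Bool.eq_iff_iff, isPrimeLoopA_iff,
    isPrimeLoopB_iff num hnn 65536 2 (by omega) (by push_cast; omega)]
  constructor
  · intro h j hj hjj
    apply h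
    rw [PySem.List.mem_pyRange_one]
    have := (sqrt_bridge num j hnn (by omega)).mp hjj
    rw [hq]
    omega
  · intro h i hi
    rw [PySem.List.mem_pyRange_one, hq] at hi
    exact h i hi.1 ((sqrt_bridge num i hnn (by omega)).mpr (by omega))

-- ===== VERDICT (by name: the statement is the Claim_ definition above) =====
theorem checkHappyPrime_spec : Claim_equal_checkHappyPrime := by
  intro num hdom hpre
  unfold Spec_checkHappyPrime
  unfold Dom_checkHappyPrime pvDomInt at hdom
  rw [decide_eq_true_iff] at hdom
  unfold Pre_checkHappyPrime at hpre
  by_cases hsmall : num ≤ 810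
  · have h := small_eq num.toNat (by omega)
    rwa [Int.toNat_of_nonneg hpre] at h
  · have hp := isPrime_eq num (by omega) (by omega)
    unfold checkHappyPrime checkHappyPrime_alt
    rw [hp]
    cases hb : isPrimeB num with
    | false => rfl
    | true =>
      simp only [Bool.not_true, Bool.false_eq_true, if_false]
      rw [show (1000:Nat) = 999 + 1 from rfl, happyLoopA, happyLoopB]
      rw [if_pos (⟨by omega, by simp [PySem.Set.empty]⟩ : num ≠ 1 ∧ num ∉ PySem.Set.empty)]
      rw [if_pos (⟨by omega, by omega⟩ : num ≠ 1 ∧ num ≠ 4)]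
      have hg0 := gss_nonneg num
      have hg8 := gss_le_810 num hpre (by omega)
      rw [happyLoopA_congr 999 (getSquareSum num) (PySem.Set.add PySem.Set.empty num)
        PySem.Set.empty
        (fun x hx0 hx8 => by
          simp only [PySem.Set.mem_add]
          constructor
          · rintro (h | rfl)
            · exact h
            · omega
          · intro h; exact Or.inl h)
        hg0 hg8]
      have h := happy_small (getSquareSum num).toNat (by omega)
      rwa [Int.toNat_of_nonneg hg0] at h
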